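-- pv_equiv track=rewrite | github.com/sunyilgdx/SIFRank | embeddings/sent_emb_sif.py | get_sent_sectioned
-- ===== SOURCE A (Python) =====
-- def get_sent_sectioned(sents_tokened):
--     max_seq_len = 16
--     sents_sectioned = []
--     for sent_tokened in sents_tokened:
--         if(len(sent_tokened)<=max_seq_len):
--             sents_sectioned.append(sent_tokened)
--         else:
--             # position_list= []
--             position = 0
--             for i,token in enumerate(sent_tokened):
--                 if(token =='.'):
--                     if(i - position>=max_seq_len):
--                         sents_sectioned.append(sent_tokened[position:i+1])
--                         position = i+1
--             if(len(sent_tokened[position:])>0):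
--                 sents_sectioned.append(sent_tokened[position:])
--     return sents_sectioned
-- ===== SOURCE B (Python) =====
-- def get_sent_sectioned(sents_tokened):
--     max_seq_len = 16
--
--     def cut(sent):
--         # find the first period at index >= max_seq_len; cut there and recurse
--         for j in range(max_seq_len, len(sent)):
--             if sent[j] == '.':
--                 return [sent[:j + 1]] + cut(sent[j + 1:])
--         return [sent] if sent else []
--
--     sents_sectioned = []
--     for sent_tokened in sents_tokened:
--         if len(sent_tokened) <= max_seq_len:
--             sents_sectioned.append(sent_tokened)
--         else:
--             sents_sectioned.extend(cut(sent_tokened))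
--     return sents_sectioned
-- ===== Notes on version B (the rewrite author's own statement) =====
-- stated objective: alternative
-- what changed: A scans every token of a long sentence with a running cursor and an inlined period test; B instead recursively searches for the next cut point directly (the first period at index >= 16 of the remaining suffix, never examining the first 16 tokens of each piece), slices there and recurses on the suffix, with no cursor or global accumulator.
import Mathlib
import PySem

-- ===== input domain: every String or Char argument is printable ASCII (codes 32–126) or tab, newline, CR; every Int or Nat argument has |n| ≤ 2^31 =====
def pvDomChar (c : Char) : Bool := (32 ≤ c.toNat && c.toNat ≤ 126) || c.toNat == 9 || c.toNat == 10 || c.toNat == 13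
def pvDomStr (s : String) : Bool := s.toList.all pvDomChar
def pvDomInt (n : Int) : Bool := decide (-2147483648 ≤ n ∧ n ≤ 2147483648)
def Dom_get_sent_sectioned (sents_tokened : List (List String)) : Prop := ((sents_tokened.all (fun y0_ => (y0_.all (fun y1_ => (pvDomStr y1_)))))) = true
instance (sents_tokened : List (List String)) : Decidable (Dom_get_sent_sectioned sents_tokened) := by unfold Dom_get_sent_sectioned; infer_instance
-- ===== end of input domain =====

-- B replaces A's token-by-token cursor scan of each long sentence by a recursion that searches
-- directly for the next cut point (the first '.' at index ≥ 16 of the remaining suffix) and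
-- recurses on the suffix after the cut; same asymptotic cost, different decomposition.

-- ===== PORT A =====
-- inner enumerate loop of A: state = (position, sents_sectioned)
def pvInnerA (sent : List String) (st : Int × List (List String))
    (l : List (Int × String)) : Int × List (List String) :=
  l.foldl (fun s p =>
    if p.2 == "." then
      if p.1 - s.1 ≥ 16 then
        (p.1 + 1, s.2 ++ [PySem.List.slice sent (some s.1) (some (p.1 + 1))])
      else s
    else s) st

def get_sent_sectioned (sents_tokened : List (List String)) : List (List String) :=
  sents_tokened.foldl (fun acc sent =>
    if sent.length ≤ 16 then acc ++ [sent]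
    else
      let st := pvInnerA sent (0, acc) (PySem.List.enumerate sent)
      let rest := PySem.List.slice sent (some st.1) none
      if rest.length > 0 then st.2 ++ [rest] else st.2) []

-- ===== PORT B =====
-- B's `for j in range(16, len(sent)): if sent[j] == '.': return …` early-return search:
-- the first j in [16, len sent) with sent[j] == "." (indexing always in range, so getD is exact)
def pvNextCut (sent : List String) : Option Nat :=
  (List.range' 16 (sent.length - 16)).find? (fun j => sent.getD j "" == ".")

-- B's recursive `cut`: sent[:j+1] = take (j+1), sent[j+1:] = drop (j+1) (nonnegative in-range bounds)
def pvCut (sent : List String) : List (List String) :=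
  match h : pvNextCut sent with
  | some j => sent.take (j + 1) :: pvCut (sent.drop (j + 1))
  | none => if sent ≠ [] then [sent] else []
termination_by sent.length
decreasing_by
  have hm := List.mem_of_find?_eq_some h
  have hb := List.mem_range'_1.mp hm
  simp only [List.length_drop]
  omega

def get_sent_sectioned_alt (sents_tokened : List (List String)) : List (List String) :=
  sents_tokened.foldl (fun acc sent =>
    if sent.length ≤ 16 then acc ++ [sent] else acc ++ pvCut sent) []

-- ===== PRECONDITION & SPEC =====
def Spec_get_sent_sectioned (sents_tokened : List (List String)) (out : List (List String)) : Prop := out = get_sent_sectioned_alt sents_tokened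
instance (sents_tokened : List (List String)) (out : List (List String)) : Decidable (Spec_get_sent_sectioned sents_tokened out) := by unfold Spec_get_sent_sectioned; infer_instance

-- ===== CLAIM (what is proved, stated in full; the proofs are below) =====
def Claim_equal_get_sent_sectioned : Prop := ∀ (sents_tokened : List (List String)), Dom_get_sent_sectioned sents_tokened → Spec_get_sent_sectioned sents_tokened (get_sent_sectioned sents_tokened)

-- ===== LEMMAS AND PROOFS =====

-- A's inner loop only appends to the accumulator component of its state
theorem pvInnerA_acc (sent : List String) (l : List (Int × String)) :
    ∀ (pos : Int) (acc : List (List String)),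
      pvInnerA sent (pos, acc) l =
        ((pvInnerA sent (pos, []) l).1, acc ++ (pvInnerA sent (pos, []) l).2) := by
  induction l with
  | nil => intro pos acc; simp [pvInnerA]
  | cons p t ih =>
    intro pos acc
    rw [show pvInnerA sent (pos, acc) (p :: t) = pvInnerA sent
          (if p.2 == "." then (if p.1 - pos ≥ 16 then
              (p.1 + 1, acc ++ [PySem.List.slice sent (some pos) (some (p.1 + 1))])
            else (pos, acc)) else (pos, acc)) t from rfl,
        show pvInnerA sent (pos, []) (p :: t) = pvInnerA sent
          (if p.2 == "." then (if p.1 - pos ≥ 16 then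
              (p.1 + 1, [] ++ [PySem.List.slice sent (some pos) (some (p.1 + 1))])
            else (pos, ([] : List (List String)))) else (pos, [])) t from rfl]
    split_ifs with h1 h2
    · rw [ih (p.1 + 1) (acc ++ [PySem.List.slice sent (some pos) (some (p.1 + 1))]),
          ih (p.1 + 1) ([] ++ [PySem.List.slice sent (some pos) (some (p.1 + 1))])]
      simp
    · exact ih pos acc
    · exact ih pos acc

-- A's inner loop is a no-op on a segment with no cut-triggering entry
theorem pvInnerA_noop (sent : List String) :
    ∀ (l : List (Int × String)) (pos : Int) (acc : List (List String)),
      (∀ p ∈ l, p.2 = "." → p.1 - pos < 16) → pvInnerA sent (pos, acc) l = (pos, acc) := by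
  intro l
  induction l with
  | nil => intro pos acc _; rfl
  | cons p t ih =>
    intro pos acc h
    rw [show pvInnerA sent (pos, acc) (p :: t) = pvInnerA sent
          (if p.2 == "." then (if p.1 - pos ≥ 16 then
              (p.1 + 1, acc ++ [PySem.List.slice sent (some pos) (some (p.1 + 1))])
            else (pos, acc)) else (pos, acc)) t from rfl]
    have ht : ∀ q ∈ t, q.2 = "." → q.1 - pos < 16 := fun q hq => h q (List.mem_cons_of_mem _ hq)
    split_ifs with h1 h2
    · exact absurd (h p (List.mem_cons_self ..) (by simpa using h1)) (by omega)
    · exact ih pos acc ht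
    · exact ih pos acc ht

-- characterisation of B's early-return search
theorem pvNextCut_some {sent : List String} {j : Nat} (h : pvNextCut sent = some j) :
    16 ≤ j ∧ j < sent.length ∧ sent.getD j "" = "." ∧
      ∀ m, 16 ≤ m → m < j → ¬ sent.getD m "" = "." := by
  unfold pvNextCut at h
  rw [List.find?_eq_some_iff_getElem] at h
  obtain ⟨hp, i, hi, hj, hmin⟩ := h
  simp only [List.length_range'] at hi
  simp only [List.getElem_range'] at hj
  subst hj
  refine ⟨by omega, by omega, by simpa using hp, fun m hm1 hm2 => fun hc => ?_⟩
  have := hmin (m - 16) (by omega)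
  simp only [List.getElem_range'] at this
  rw [show 16 + 1 * (m - 16) = m by omega] at this
  rw [List.getD_eq_getElem?_getD] at hc
  simp [hc] at this

theorem pvNextCut_none {sent : List String} (h : pvNextCut sent = none) :
    ∀ m, 16 ≤ m → m < sent.length → ¬ sent.getD m "" = "." := by
  intro m h1 h2 hc
  have := List.find?_eq_none.mp h m (List.mem_range'_1.mpr ⟨h1, by omega⟩)
  rw [List.getD_eq_getElem?_getD] at hc
  simp [hc] at this

-- dropping k entries of an enumeration enumerates the dropped list from k
theorem enum_drop {α : Type} : ∀ (xs : List α) (s : Int) (k : Nat),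
    (PySem.List.enumerate xs s).drop k = PySem.List.enumerate (xs.drop k) (s + k) := by
  intro xs
  induction xs with
  | nil => intro s k; simp [PySem.List.enumerate_nil]
  | cons x xs ih =>
    intro s k
    cases k with
    | zero => simp
    | succ k =>
      rw [PySem.List.enumerate_cons]
      simp only [List.drop_succ_cons]
      rw [ih (s+1) k]
      congr 1
      push_cast; ring

-- A's cursor loop from position k, followed by the remainder append
def pvTailA (sent : List String) (k : Nat) : List (List String) :=
  let st := pvInnerA sent ((k : Int), []) ((PySem.List.enumerate sent).drop k)
  let rest := PySem.List.slice sent (some st.1) none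
  if rest.length > 0 then st.2 ++ [rest] else st.2

-- MAIN: A's cursor loop from position k equals B's recursion on the suffix from k
theorem pvTail_eq (sent : List String) : ∀ (n k : Nat), sent.length - k ≤ n → k ≤ sent.length →
    pvTailA sent k = pvCut (sent.drop k) := by
  intro n
  induction n with
  | zero =>
    intro k h1 h2
    have hk : k = sent.length := by omega
    subst hk
    have he : (PySem.List.enumerate sent 0).drop sent.length = [] := by
      rw [List.drop_eq_nil_iff, PySem.List.length_enumerate]
    have hcut : pvCut ([] : List String) = [] := by
      rw [pvCut.eq_def]
      split
      · rename_i j heq; exact absurd heq (by simp [pvNextCut])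
      · simp
    rw [pvTailA, he]
    show (if (PySem.List.slice sent (some ((sent.length : Nat) : Int)) none).length > 0 then _ else _) = _
    rw [PySem.List.slice_from_natCast]
    simp [pvInnerA, hcut]
  | succ n ih =>
    intro k h1 h2
    cases h : pvNextCut (sent.drop k) with
    | none =>
      have hnone := pvNextCut_none h
      have hnoop : pvInnerA sent ((k : Int), []) ((PySem.List.enumerate sent).drop k) = ((k : Int), []) := by
        rw [enum_drop sent 0 k, zero_add]
        apply pvInnerA_noop
        intro p hp hdot
        obtain ⟨i, hi, hpe⟩ := (PySem.List.mem_enumerate_iff _ _ _).mp hp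
        subst hpe
        simp only at hdot ⊢
        by_cases hi16 : 16 ≤ i
        · exact absurd (by rw [List.getD_eq_getElem _ _ hi]; exact hdot) (hnone i hi16 hi)
        · omega
      have hcut : pvCut (sent.drop k) = if sent.drop k ≠ [] then [sent.drop k] else [] := by
        rw [pvCut.eq_def]
        split
        · rename_i j heq; rw [h] at heq; exact absurd heq (by simp)
        · rfl
      rw [pvTailA, hnoop]
      show (if (PySem.List.slice sent (some ((k : Nat) : Int)) none).length > 0 then _ else _) = _
      rw [PySem.List.slice_from_natCast, hcut]
      by_cases hd : sent.drop k = []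
      · simp [hd]
      · have hk : k < sent.length := by
          have h' := List.length_pos_iff.mpr hd
          rw [List.length_drop] at h'; omega
        simp [hd, hk]
    | some j =>
      obtain ⟨hj16, hjlen, hjdot, hjmin⟩ := pvNextCut_some h
      have hdl : (sent.drop k).length = sent.length - k := List.length_drop
      -- split the enumeration at the cut entry
      have hsplit : (PySem.List.enumerate sent 0).drop k =
          PySem.List.enumerate ((sent.drop k).take j) (k : Int) ++
          (((k : Int) + j, (sent.drop k)[j]'(by omega)) ::
            PySem.List.enumerate ((sent.drop k).drop (j + 1)) ((k : Int) + j + 1)) := by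
        rw [enum_drop sent 0 k, zero_add]
        conv_lhs => rw [← List.take_append_drop j (sent.drop k)]
        rw [PySem.List.enumerate_append, List.length_take, min_eq_left (by omega)]
        congr 1
        rw [List.drop_eq_getElem_cons (show j < (sent.drop k).length by omega),
           PySem.List.enumerate_cons]
      have hdot : (sent.drop k)[j]'(by omega) = "." := by
        rw [← List.getD_eq_getElem _ "" (by omega)]; exact hjdot
      have hnoop : pvInnerA sent ((k : Int), []) (PySem.List.enumerate ((sent.drop k).take j) (k : Int)) = ((k : Int), []) := by
        apply pvInnerA_noop
        intro p hp hdot'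
        obtain ⟨i, hi, hpe⟩ := (PySem.List.mem_enumerate_iff _ _ _).mp hp
        subst hpe
        simp only at hdot' ⊢
        rw [List.length_take] at hi
        have hij : i < j := by omega
        rw [List.getElem_take] at hdot'
        by_cases hi16 : 16 ≤ i
        · exact absurd (by rw [List.getD_eq_getElem _ _ (by omega)]; exact hdot') (hjmin i hi16 hij)
        · omega
      -- one cut step
      have hstep : pvInnerA sent ((k : Int), [])
          ((((k : Int) + j, (sent.drop k)[j]'(by omega)) ::
            PySem.List.enumerate ((sent.drop k).drop (j + 1)) ((k : Int) + j + 1))) =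
          pvInnerA sent ((k : Int) + j + 1,
            [PySem.List.slice sent (some (k : Int)) (some ((k : Int) + j + 1))])
            (PySem.List.enumerate ((sent.drop k).drop (j + 1)) ((k : Int) + j + 1)) := by
        show pvInnerA sent (if _ then _ else _) _ = _
        rw [hdot]
        rw [if_pos (by simp), if_pos (by push_cast; omega)]
        simp
      have hpiece : PySem.List.slice sent (some (k : Int)) (some ((k : Int) + j + 1)) =
          (sent.drop k).take (j + 1) := by
        rw [show ((k : Int) + j + 1) = ((k + j + 1 : Nat) : Int) by push_cast; ring]
        rw [PySem.List.slice_natCast]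
        congr 1; omega
      have htail : PySem.List.enumerate ((sent.drop k).drop (j + 1)) ((k : Int) + j + 1) =
          (PySem.List.enumerate sent 0).drop (k + j + 1) := by
        rw [enum_drop sent 0 (k + j + 1), zero_add, List.drop_drop]
        congr 1
      -- assemble
      rw [pvTailA, hsplit, pvInnerA, List.foldl_append, ← pvInnerA, ← pvInnerA, hnoop, hstep, hpiece, htail]
      rw [show ((k : Int) + j + 1) = ((k + j + 1 : Nat) : Int) by push_cast; ring]
      rw [pvInnerA_acc sent _ _ [(sent.drop k).take (j + 1)]]
      have hihyp := ih (k + j + 1) (by omega) (by omega)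
      rw [pvTailA] at hihyp
      simp only []
      have hcut : pvCut (sent.drop k) =
          (sent.drop k).take (j + 1) :: pvCut ((sent.drop k).drop (j + 1)) := by
        rw [pvCut.eq_def]
        split
        · rename_i j' heq
          rw [h] at heq
          have hj' : j' = j := by simpa using heq.symm
          subst hj'; rfl
        · rename_i heq; rw [h] at heq; simp at heq
      rw [hcut]
      have hdd : (sent.drop k).drop (j + 1) = sent.drop (k + j + 1) := by
        rw [List.drop_drop]
        congr 1
      rw [hdd, ← hihyp]
      split <;> simp

-- one step of A's outer loop equals one step of B's
theorem pvStep_eq (acc : List (List String)) (sent : List String) :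
    (if sent.length ≤ 16 then acc ++ [sent]
     else
       let st := pvInnerA sent (0, acc) (PySem.List.enumerate sent)
       let rest := PySem.List.slice sent (some st.1) none
       if rest.length > 0 then st.2 ++ [rest] else st.2) =
    (if sent.length ≤ 16 then acc ++ [sent] else acc ++ pvCut sent) := by
  split_ifs with hlen
  · rfl
  · have h0 := pvTail_eq sent sent.length 0 (by omega) (by omega)
    rw [pvTailA] at h0
    simp only [Nat.cast_zero, List.drop_zero] at h0
    show (let st := pvInnerA sent (0, acc) (PySem.List.enumerate sent)
          let rest := PySem.List.slice sent (some st.1) none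
          if rest.length > 0 then st.2 ++ [rest] else st.2) = acc ++ pvCut sent
    rw [pvInnerA_acc sent _ 0 acc]
    simp only []
    rw [← h0]
    split <;> simp

-- ===== VERDICT (by name: the statement is the Claim_ definition above) =====
theorem get_sent_sectioned_spec : Claim_equal_get_sent_sectioned := by
  intro sents _
  unfold Spec_get_sent_sectioned get_sent_sectioned get_sent_sectioned_alt
  simp only [pvStep_eq]
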